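-- pv_equiv track=rewrite | github.com/wuwangzhang1216/openDB | benchmark/gen_workspace.py | _parse_rst_lines
-- ===== SOURCE A (Python) =====
-- def _parse_rst_lines(content: str) -> None:
--     """Parse RST-style text into (type, text) tuples.
--     Types: 'h1', 'h2', 'text', 'blank'."""
--     lines = content.split("\n")
--     result = []
--     i = 0
--     while i < len(lines):
--         line = lines[i]
--         next_line = lines[i + 1] if i + 1 < len(lines) else ""
--         stripped_next = next_line.strip()
--         if stripped_next and len(stripped_next) >= 3 and set(stripped_next) <= {"="}:
--             result.append(("h1", line.strip()))
--             i += 2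
--             continue
--         if stripped_next and len(stripped_next) >= 3 and set(stripped_next) <= {"-"}:
--             result.append(("h2", line.strip()))
--             i += 2
--             continue
--         if line.strip():
--             result.append(("text", line))
--         else:
--             result.append(("blank", ""))
--         i += 1
--     return result
-- ===== SOURCE B (Python) =====
-- def _parse_rst_lines(content: str) -> None:
--     """Single forward pass carrying one pending line; emit a header when the
--     current line underlines the pending one, otherwise flush the pending line."""
--     result = []
--     held = False   # sentinel flag: is a previous line being carried?
--     pending = ""
--     for line in content.split("\n"):
--         if held:
--             s = line.strip()
--             if len(s) >= 3 and set(s) <= {"="}: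
--                 result.append(("h1", pending.strip()))
--                 held = False
--                 continue
--             if len(s) >= 3 and set(s) <= {"-"}:
--                 result.append(("h2", pending.strip()))
--                 held = False
--                 continue
--             result.append(("text", pending) if pending.strip() else ("blank", ""))
--         pending = line
--         held = True
--     if held:
--         result.append(("text", pending) if pending.strip() else ("blank", ""))
--     return result
-- ===== Notes on version B (the rewrite author's own statement) =====
-- stated objective: alternative
-- what changed: Replaces the index-based while loop with variable steps (i+=1 / i+=2) and lookahead at lines[i+1] by a single forward pass that carries one pending line in a sentinel-guarded buffer and flushes it (or emits a header when the current line is an underline) as it goes, with a final flush after the loop.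
import Mathlib
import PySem

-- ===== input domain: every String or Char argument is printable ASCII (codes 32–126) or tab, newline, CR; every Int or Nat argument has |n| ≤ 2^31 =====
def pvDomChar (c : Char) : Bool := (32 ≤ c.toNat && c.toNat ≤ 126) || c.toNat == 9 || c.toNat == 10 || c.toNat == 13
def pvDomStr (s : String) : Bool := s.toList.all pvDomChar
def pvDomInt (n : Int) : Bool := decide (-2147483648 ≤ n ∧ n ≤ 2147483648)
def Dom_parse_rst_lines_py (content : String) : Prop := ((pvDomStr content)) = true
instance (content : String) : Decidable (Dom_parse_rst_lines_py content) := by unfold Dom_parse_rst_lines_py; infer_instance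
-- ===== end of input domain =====

-- B replaces A's lookahead while-loop (index steps of 1 or 2) by a one-pass carry of a
-- pending line with an end-of-input flush; same return value, no speed claim (alternative).

-- ===== PORT A =====
-- underline test as A writes it: stripped next line truthy, len >= 3, all chars = c
def pvUnderA (c : Char) (next_line : String) : Bool :=
  let sn := (PySem.Str.strip next_line).toList
  decide (sn ≠ []) && decide (3 ≤ sn.length) && sn.all (fun ch => ch == c)

def pvLoopA : List String → List (String × String)
  | [] => []
  | line :: rest =>
    let next_line : String := match rest with | [] => "" | n :: _ => n
    if pvUnderA '=' next_line then
      ("h1", PySem.Str.strip line) :: pvLoopA rest.tail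
    else if pvUnderA '-' next_line then
      ("h2", PySem.Str.strip line) :: pvLoopA rest.tail
    else if (PySem.Str.strip line).toList ≠ [] then
      ("text", line) :: pvLoopA rest
    else
      ("blank", "") :: pvLoopA rest
termination_by xs => xs.length
decreasing_by all_goals simp [List.length_tail]

def parse_rst_lines_py (content : String) : List (String × String) :=
  pvLoopA ((PySem.Str.split? content "\n").getD [])

-- ===== PORT B =====
-- underline test as B writes it: len(stripped) >= 3 and all chars = c
def pvUnderB (c : Char) (line : String) : Bool :=
  let s := (PySem.Str.strip line).toList
  decide (3 ≤ s.length) && s.all (fun ch => ch == c)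

-- flush the pending line: ('text', line) if truthy when stripped, else ('blank','')
def pvFlush (p : String) : List (String × String) :=
  if (PySem.Str.strip p).toList ≠ [] then [("text", p)] else [("blank", "")]

-- pending buffer: none = sentinel (nothing held), some p = line p carried forward
def pvLoopB : Option String → List String → List (String × String)
  | none, [] => []
  | some p, [] => pvFlush p
  | none, line :: rest => pvLoopB (some line) rest
  | some p, line :: rest =>
    if pvUnderB '=' line then ("h1", PySem.Str.strip p) :: pvLoopB none rest
    else if pvUnderB '-' line then ("h2", PySem.Str.strip p) :: pvLoopB none rest
    else pvFlush p ++ pvLoopB (some line) rest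

def parse_rst_lines_py_alt (content : String) : List (String × String) :=
  pvLoopB none ((PySem.Str.split? content "\n").getD [])

-- ===== PRECONDITION & SPEC =====
def Spec_parse_rst_lines_py (content : String) (out : List (String × String)) : Prop := out = parse_rst_lines_py_alt content
instance (content : String) (out : List (String × String)) : Decidable (Spec_parse_rst_lines_py content out) := by unfold Spec_parse_rst_lines_py; infer_instance

-- ===== CLAIM (what is proved, stated in full; the proofs are below) =====
def Claim_equal_parse_rst_lines_py : Prop := ∀ (content : String), Dom_parse_rst_lines_py content → Spec_parse_rst_lines_py content (parse_rst_lines_py content)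

-- ===== LEMMAS AND PROOFS =====

-- the nonemptiness conjunct of A's underline test is implied by the length conjunct
theorem pvUnder_aux (c : Char) (l : List Char) :
    (decide (l ≠ []) && decide (3 ≤ l.length) && l.all (fun ch => ch == c))
      = (decide (3 ≤ l.length) && l.all (fun ch => ch == c)) := by
  cases l <;> simp

-- A's underline test equals B's
theorem pvUnder_eq (c : Char) (s : String) : pvUnderA c s = pvUnderB c s :=
  pvUnder_aux c ((PySem.Str.strip s).toList)

theorem pvLoopA_nil : pvLoopA [] = [] := by rw [pvLoopA]

theorem pvUnderA_empty (c : Char) : pvUnderA c "" = false := by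
  have h : (PySem.Str.strip "").toList = [] := by decide
  simp [pvUnderA, h]

-- carrying p through B's loop is A's loop on p consed in front of the remaining lines
theorem pv_key : ∀ (xs : List String) (p : String), pvLoopB (some p) xs = pvLoopA (p :: xs)
  | [], p => by
    rw [pvLoopA]
    simp [pvLoopB, pvLoopA_nil, pvUnderA_empty, pvFlush]
  | line :: rest, p => by
    rw [pvLoopA]
    simp only [pvUnder_eq, List.tail_cons]
    show (if pvUnderB '=' line then ("h1", PySem.Str.strip p) :: pvLoopB none rest
      else if pvUnderB '-' line then ("h2", PySem.Str.strip p) :: pvLoopB none rest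
      else pvFlush p ++ pvLoopB (some line) rest) = _
    by_cases h1 : pvUnderB '=' line = true
    · simp only [h1, if_true]
      cases rest with
      | nil => simp [pvLoopB, pvLoopA_nil]
      | cons l' r' => show _ :: pvLoopB (some l') r' = _; rw [pv_key r' l']
    · simp only [h1, Bool.false_eq_true, if_false]
      by_cases h2 : pvUnderB '-' line = true
      · simp only [h2, if_true]
        cases rest with
        | nil => simp [pvLoopB, pvLoopA_nil]
        | cons l' r' => show _ :: pvLoopB (some l') r' = _; rw [pv_key r' l']
      · simp only [h2, Bool.false_eq_true, if_false]
        rw [pv_key rest line, pvFlush]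
        split_ifs <;> simp
termination_by xs => xs.length
decreasing_by all_goals simp

theorem pvLoop_eq (xs : List String) : pvLoopA xs = pvLoopB none xs := by
  cases xs with
  | nil => exact pvLoopA_nil
  | cons l r => show _ = pvLoopB (some l) r; rw [pv_key r l]

-- ===== VERDICT (by name: the statement is the Claim_ definition above) =====
theorem parse_rst_lines_py_spec : Claim_equal_parse_rst_lines_py := by
  intro content _
  unfold Spec_parse_rst_lines_py parse_rst_lines_py parse_rst_lines_py_alt
  exact pvLoop_eq _
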